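-- pv_equiv track=rewrite | github.com/Huxhh/LeetCodePy | WeeklyMatch/Two22.py | maxNumberOfFamilies2
-- ===== SOURCE A (Python) =====
-- def maxNumberOfFamilies2(n, reservedSeats):
--     d = {}
--     res = n * 2
--     for r, c in reservedSeats:
--         if r not in d:
--             d[r] = []
--         d[r].append(c)
--     for k in d:
--         s1, s2, s3 = 0, 0, 0
--         for s in d[k]:
--             if s in [1, 10]:
--                 continue
--             if 2 <= s <= 5:
--                 s1 = 1
--             if 4 <= s <= 7:
--                 s3 = 1
--             if 6 <= s <= 9:
--                 s2 = 1
--         if s1 and s2 and s3: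
--             res -= 2
--         elif s1 and s2 and not s3:
--             res -= 1
--         elif not s1 and not s2 and not s3:
--             res -= 0
--         else:
--             res -= 1
--     return res
-- ===== SOURCE B (Python) =====
-- def maxNumberOfFamilies2(n, reservedSeats):
--     # Sort by row, scan runs of equal rows (no dict), and COUNT the families
--     # that still fit per reserved row (left block 2-5, right block 6-9,
--     # middle block 4-7), starting from 2 free families per row.
--     seats = sorted(reservedSeats, key=lambda p: p[0])
--     res = 2 * n
--     i, m = 0, len(seats)
--     while i < m:
--         r = seats[i][0]
--         cols = []
--         while i < m and seats[i][0] == r: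
--             cols.append(seats[i][1])
--             i += 1
--         left = all(not (2 <= c <= 5) for c in cols)
--         right = all(not (6 <= c <= 9) for c in cols)
--         mid = all(not (4 <= c <= 7) for c in cols)
--         if left and right:
--             fit = 2
--         elif left or right or mid:
--             fit = 1
--         else:
--             fit = 0
--         res += fit - 2
--     return res
-- ===== Notes on version B (the rewrite author's own statement) =====
-- stated objective: alternative
-- what changed: A groups seats into a dict of per-row lists, rescans each list with three blocked-flags and subtracts a penalty via a four-branch elif chain; B uses no dict at all: it sorts the reservations by row, scans consecutive equal-row runs once, and positively COUNTS the families that still fit per row (left/right/middle availability), relying on the fact that a blocked middle window implies a blocked side window.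
import Mathlib
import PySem

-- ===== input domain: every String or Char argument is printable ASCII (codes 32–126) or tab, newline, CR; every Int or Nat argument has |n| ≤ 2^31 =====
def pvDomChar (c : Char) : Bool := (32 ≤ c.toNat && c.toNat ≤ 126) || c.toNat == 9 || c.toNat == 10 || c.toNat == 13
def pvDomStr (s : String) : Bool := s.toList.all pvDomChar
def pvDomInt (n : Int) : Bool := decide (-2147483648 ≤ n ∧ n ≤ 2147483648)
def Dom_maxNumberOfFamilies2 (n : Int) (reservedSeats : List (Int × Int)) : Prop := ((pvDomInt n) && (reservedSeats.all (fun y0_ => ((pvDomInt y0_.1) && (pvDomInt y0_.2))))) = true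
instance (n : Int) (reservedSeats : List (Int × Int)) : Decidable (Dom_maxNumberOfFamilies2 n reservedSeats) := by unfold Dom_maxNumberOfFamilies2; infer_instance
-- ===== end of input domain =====

-- B drops A's dict-of-row-lists and penalty chain: it sorts by row, scans equal-row runs
-- once, and positively counts the families that still fit per row (alternative algorithm).

-- ===== PORT A =====
-- A's inner per-seat scan over a row's reserved columns (state = (s1, s2, s3))
def pvA_scan (st : Int × Int × Int) (s : Int) : Int × Int × Int :=
  if s = 1 ∨ s = 10 then st
  else
    let st := if 2 ≤ s ∧ s ≤ 5 then (1, st.2.1, st.2.2) else st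
    let st := if 4 ≤ s ∧ s ≤ 7 then (st.1, st.2.1, 1) else st
    let st := if 6 ≤ s ∧ s ≤ 9 then (st.1, 1, st.2.2) else st
    st

def maxNumberOfFamilies2 (n : Int) (reservedSeats : List (Int × Int)) : Int :=
  let d := reservedSeats.foldl
    (fun d rc =>
      (if d.contains rc.1 then d else d.insert rc.1 ([] : List Int)).modify rc.1 [] (· ++ [rc.2]))
    PySem.Dict.empty
  d.items.foldl
    (fun res kv =>
      let st := kv.2.foldl pvA_scan (0, 0, 0)
      if st.1 ≠ 0 ∧ st.2.1 ≠ 0 ∧ st.2.2 ≠ 0 then res - 2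
      else if st.1 ≠ 0 ∧ st.2.1 ≠ 0 ∧ st.2.2 = 0 then res - 1
      else if st.1 = 0 ∧ st.2.1 = 0 ∧ st.2.2 = 0 then res - 0
      else res - 1)
    (n * 2)

-- ===== PORT B =====
-- families that still fit in one reserved row, from its reserved columns
def pvB_fit (cols : List Int) : Int :=
  let left := cols.all (fun c => !(decide (2 ≤ c ∧ c ≤ 5)))
  let right := cols.all (fun c => !(decide (6 ≤ c ∧ c ≤ 9)))
  let mid := cols.all (fun c => !(decide (4 ≤ c ∧ c ≤ 7)))
  if left && right then 2 else if left || right || mid then 1 else 0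

-- the outer while loop: one pass over the sorted list, one run of equal rows at a time
def pvB_go : List (Int × Int) → Int
  | [] => 0
  | (r, c) :: t =>
      (pvB_fit (c :: (t.takeWhile (fun p => p.1 == r)).map (·.2)) - 2) +
        pvB_go (t.dropWhile (fun p => p.1 == r))
  termination_by l => l.length
  decreasing_by
    simp only [List.length_cons]
    exact Nat.lt_succ_of_le (List.length_dropWhile_le _ _)

def maxNumberOfFamilies2_alt (n : Int) (reservedSeats : List (Int × Int)) : Int :=
  2 * n + pvB_go (PySem.List.sorted reservedSeats (fun p => p.1) false)

-- ===== PRECONDITION & SPEC =====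
def Spec_maxNumberOfFamilies2 (n : Int) (reservedSeats : List (Int × Int)) (out : Int) : Prop := out = maxNumberOfFamilies2_alt n reservedSeats
instance (n : Int) (reservedSeats : List (Int × Int)) (out : Int) : Decidable (Spec_maxNumberOfFamilies2 n reservedSeats out) := by unfold Spec_maxNumberOfFamilies2; infer_instance

-- ===== CLAIM (what is proved, stated in full; the proofs are below) =====
def Claim_equal_maxNumberOfFamilies2 : Prop := ∀ (n : Int) (reservedSeats : List (Int × Int)), Dom_maxNumberOfFamilies2 n reservedSeats → Spec_maxNumberOfFamilies2 n reservedSeats (maxNumberOfFamilies2 n reservedSeats)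

-- ===== LEMMAS AND PROOFS =====
def pvB2i (b : Bool) : Int := if b then 1 else 0
def pvP1 (c : Int) : Bool := decide (2 ≤ c ∧ c ≤ 5)
def pvP2 (c : Int) : Bool := decide (6 ≤ c ∧ c ≤ 9)
def pvP3 (c : Int) : Bool := decide (4 ≤ c ∧ c ≤ 7)
def pvA_pen (st : Int × Int × Int) : Int :=
  if st.1 ≠ 0 ∧ st.2.1 ≠ 0 ∧ st.2.2 ≠ 0 then 2
  else if st.1 ≠ 0 ∧ st.2.1 ≠ 0 ∧ st.2.2 = 0 then 1
  else if st.1 = 0 ∧ st.2.1 = 0 ∧ st.2.2 = 0 then 0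
  else 1

lemma pv_scan_step (a b c3 : Bool) (s : Int) :
    pvA_scan (pvB2i a, pvB2i b, pvB2i c3) s
      = (pvB2i (a || pvP1 s), pvB2i (b || pvP2 s), pvB2i (c3 || pvP3 s)) := by
  unfold pvA_scan
  by_cases h0 : s = 1 ∨ s = 10
  · rw [if_pos h0]
    rcases h0 with rfl | rfl <;> simp [pvP1, pvP2, pvP3]
  · rw [if_neg h0]
    by_cases h1 : 2 ≤ s ∧ s ≤ 5 <;> by_cases h2 : 4 ≤ s ∧ s ≤ 7 <;>
      by_cases h3 : 6 ≤ s ∧ s ≤ 9 <;>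
      simp [pvP1, pvP2, pvP3, h1, h2, h3, pvB2i]

lemma pv_scan_fold (cols : List Int) (a b c3 : Bool) :
    cols.foldl pvA_scan (pvB2i a, pvB2i b, pvB2i c3)
      = (pvB2i (a || cols.any pvP1), pvB2i (b || cols.any pvP2), pvB2i (c3 || cols.any pvP3)) := by
  induction cols generalizing a b c3 with
  | nil => simp
  | cons c t ih =>
    simp only [List.foldl_cons, pv_scan_step, ih, List.any_cons, Bool.or_assoc]

lemma pv_any3_imp (cols : List Int) (h : cols.any pvP3 = true) :
    (cols.any pvP1 || cols.any pvP2) = true := by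
  rw [List.any_eq_true] at h
  obtain ⟨x, hx, h3⟩ := h
  simp only [pvP3, decide_eq_true_eq] at h3
  by_cases hc : x ≤ 5
  · have : cols.any pvP1 = true := by
      rw [List.any_eq_true]; exact ⟨x, hx, by simp only [pvP1, decide_eq_true_eq]; omega⟩
    simp [this]
  · have : cols.any pvP2 = true := by
      rw [List.any_eq_true]; exact ⟨x, hx, by simp only [pvP2, decide_eq_true_eq]; omega⟩
    simp [this]

lemma pv_all_not (p : Int → Bool) (l : List Int) :
    l.all (fun c => !(p c)) = !(l.any p) := by
  induction l with
  | nil => rfl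
  | cons c t ih => simp [ih]

lemma pv_scan_fold0 (cols : List Int) :
    cols.foldl pvA_scan (0, 0, 0)
      = (pvB2i (cols.any pvP1), pvB2i (cols.any pvP2), pvB2i (cols.any pvP3)) := by
  have h := pv_scan_fold cols false false false
  simpa [pvB2i] using h

lemma pv_fit_eq_pen (cols : List Int) :
    pvB_fit cols - 2 = -(pvA_pen (cols.foldl pvA_scan (0, 0, 0))) := by
  rw [pv_scan_fold0]
  unfold pvB_fit pvA_pen
  simp only [show (fun c : Int => !decide (2 ≤ c ∧ c ≤ 5)) = (fun c => !(pvP1 c)) from rfl,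
    show (fun c : Int => !decide (6 ≤ c ∧ c ≤ 9)) = (fun c => !(pvP2 c)) from rfl,
    show (fun c : Int => !decide (4 ≤ c ∧ c ≤ 7)) = (fun c => !(pvP3 c)) from rfl,
    pv_all_not]
  have himp := pv_any3_imp cols
  revert himp
  generalize cols.any pvP1 = a1
  generalize cols.any pvP2 = a2
  generalize cols.any pvP3 = a3
  intro himp
  cases a1 <;> cases a2 <;> cases a3 <;> simp_all [pvB2i]

-- pvB_fit depends only on the multiset of columns
lemma pv_fit_perm {cols cols' : List Int} (h : cols.Perm cols') : pvB_fit cols = pvB_fit cols' := by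
  unfold pvB_fit
  rw [h.all_eq, h.all_eq, h.all_eq]

-- takeWhile / dropWhile on a row-sorted list are the row filters
lemma pv_run_filter (r : Int) (t : List (Int × Int))
    (hall : ∀ x ∈ t, r ≤ x.1) (hp : t.Pairwise (fun a b => a.1 ≤ b.1)) :
    t.takeWhile (fun p => p.1 == r) = t.filter (fun p => p.1 == r) ∧
    t.dropWhile (fun p => p.1 == r) = t.filter (fun p => p.1 != r) := by
  induction t with
  | nil => simp
  | cons x s ih =>
    rw [List.pairwise_cons] at hp
    obtain ⟨hx, hs⟩ := hp
    have hallx : r ≤ x.1 := hall x (by simp)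
    by_cases hr : x.1 = r
    · have ih' := ih (fun y hy => hall y (by simp [hy])) hs
      simp [hr, ih'.1, ih'.2]
    · have hgt : r < x.1 := lt_of_le_of_ne hallx (fun e => hr e.symm)
      have hne : ∀ y ∈ s, y.1 ≠ r := by
        intro y hy
        have := hx y hy
        omega
      constructor
      · simp only [List.takeWhile_cons, List.filter_cons]
        rw [if_neg (by simp [hr]), if_neg (by simp [hr])]
        symm
        rw [List.filter_eq_nil_iff]
        intro y hy
        simp [hne y hy]
      · simp only [List.dropWhile_cons, List.filter_cons]
        rw [if_neg (by simp [hr]), if_pos (by simp [hr])]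
        congr 1
        symm
        rw [List.filter_eq_self]
        intro y hy
        simp [hne y hy]

-- the run scan equals a sum over any nodup key list with the right membership
lemma pv_go_eq : ∀ (l : List (Int × Int)), l.Pairwise (fun a b => a.1 ≤ b.1) →
    ∀ (K : List Int), K.Nodup → (∀ k, k ∈ K ↔ k ∈ l.map (·.1)) →
    pvB_go l = (K.map (fun k => pvB_fit ((l.filter (fun p => p.1 == k)).map (·.2)) - 2)).sum := by
  intro l
  induction l using pvB_go.induct with
  | case1 =>
    intro _ K hnd hmem
    have hK : K = [] := List.eq_nil_iff_forall_not_mem.mpr (fun k hk => by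
      simpa using (hmem k).mp hk)
    subst hK
    simp [pvB_go]
  | case2 r c t ih =>
    intro hp K hnd hmem
    rw [List.pairwise_cons] at hp
    obtain ⟨hall, ht⟩ := hp
    obtain ⟨htw, hdw⟩ := pv_run_filter r t hall ht
    have hrp : (t.filter (fun p => p.1 != r)).Pairwise (fun a b => a.1 ≤ b.1) := ht.filter _
    have hrnd : (K.erase r).Nodup := hnd.erase r
    have hrmem : ∀ k, k ∈ K.erase r ↔ k ∈ (t.filter (fun p => p.1 != r)).map (·.1) := by
      intro k
      rw [hnd.mem_erase_iff]
      constructor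
      · rintro ⟨hkr, hk⟩
        have := (hmem k).mp hk
        simp only [List.map_cons, List.mem_cons] at this
        rcases this with h | h
        · exact absurd h hkr
        · simp only [List.mem_map] at h ⊢
          obtain ⟨p, hpt, hpk⟩ := h
          exact ⟨p, by simp [List.mem_filter, hpt, hpk, hkr], hpk⟩
      · intro hk
        simp only [List.mem_map, List.mem_filter] at hk
        obtain ⟨p, ⟨hpt, hpr⟩, hpk⟩ := hk
        have hkr : k ≠ r := by subst hpk; simpa using hpr
        refine ⟨hkr, (hmem k).mpr ?_⟩
        simp only [List.map_cons, List.mem_cons]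
        exact Or.inr (List.mem_map.mpr ⟨p, hpt, hpk⟩)
    rw [hdw] at ih
    have hih := ih hrp (K.erase r) hrnd hrmem
    have hr : r ∈ K := (hmem r).mpr (by simp)
    have hsum : (K.map (fun k => pvB_fit ((((r, c) :: t).filter (fun p => p.1 == k)).map (·.2)) - 2)).sum
        = ((r :: K.erase r).map (fun k => pvB_fit ((((r, c) :: t).filter (fun p => p.1 == k)).map (·.2)) - 2)).sum :=
      ((List.perm_cons_erase hr).map _).sum_eq
    rw [hsum]
    simp only [List.map_cons, List.sum_cons]
    -- head term
    have hhead : (((r, c) :: t).filter (fun p => p.1 == r)).map (·.2)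
        = c :: (t.takeWhile (fun p => p.1 == r)).map (·.2) := by
      rw [htw]
      simp
    -- tail terms: for k ≠ r the filter ignores the r-run
    have htail : ∀ k ∈ K.erase r,
        pvB_fit ((((r, c) :: t).filter (fun p => p.1 == k)).map (·.2)) - 2
          = pvB_fit ((((t.filter (fun p => p.1 != r)).filter (fun p => p.1 == k)).map (·.2))) - 2 := by
      intro k hk
      have hkr : k ≠ r := (hnd.mem_erase_iff.mp hk).1
      have hfe : ((r, c) :: t).filter (fun p => p.1 == k)
          = (t.filter (fun p => p.1 != r)).filter (fun p => p.1 == k) := by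
        rw [List.filter_filter]
        rw [List.filter_cons]
        rw [if_neg (by simp [Ne.symm hkr])]
        apply List.filter_congr
        intro p _
        by_cases hpk : p.1 = k
        · simp [hpk, hkr]
        · simp [hpk]
      rw [hfe]
    rw [List.map_congr_left htail]
    show pvB_go ((r, c) :: t) = _
    rw [pvB_go, hdw, hih, hhead]


-- A builds its dict with a redundant pre-insert; it is a plain modify loop
lemma pv_dA_modify (reservedSeats : List (Int × Int)) :
    reservedSeats.foldl
      (fun d rc => (if d.contains rc.1 then d else d.insert rc.1 ([] : List Int)).modify rc.1 [] (· ++ [rc.2]))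
      PySem.Dict.empty
    = reservedSeats.foldl (fun d rc => d.modify rc.1 [] (· ++ [rc.2])) PySem.Dict.empty := by
  apply PySem.List.foldl_congr_mem
  intro d rc _
  by_cases h : d.contains rc.1
  · simp [h]
  · simp only [h]
    have hg : d.getD rc.1 ([] : List Int) = [] :=
      PySem.Dict.getD_of_not_contains _ _ (by simpa using h)
    simp [PySem.Dict.modify, PySem.Dict.getD_insert_self, PySem.Dict.insert_insert_self, hg]

lemma pv_A_eq_sum (n : Int) (rs : List (Int × Int)) :
    maxNumberOfFamilies2 n rs
      = n * 2 + ((PySem.Set.ofList (rs.map (·.1))).map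
          (fun k => -(pvA_pen (((rs.filter (fun p => p.1 == k)).map (·.2)).foldl pvA_scan (0, 0, 0))))).sum := by
  unfold maxNumberOfFamilies2
  rw [pv_dA_modify]
  set dA := rs.foldl (fun d rc => d.modify rc.1 [] (· ++ [rc.2])) PySem.Dict.empty with hdA
  have ndA : dA.keys.Nodup := by
    rw [hdA]
    exact PySem.Dict.nodup_keys_foldl_modify_key rs (·.1) [] (fun d rc => (· ++ [rc.2])) _ (by simp)
  have hkeys : dA.keys = PySem.Set.ofList (rs.map (·.1)) := by
    rw [hdA, PySem.Dict.keys_foldl_modify_key]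
    rfl
  have hbody : dA.items.foldl
      (fun res kv =>
        let st := kv.2.foldl pvA_scan ((0 : Int), (0 : Int), (0 : Int))
        if st.1 ≠ 0 ∧ st.2.1 ≠ 0 ∧ st.2.2 ≠ 0 then res - 2
        else if st.1 ≠ 0 ∧ st.2.1 ≠ 0 ∧ st.2.2 = 0 then res - 1
        else if st.1 = 0 ∧ st.2.1 = 0 ∧ st.2.2 = 0 then res - 0
        else res - 1) (n * 2)
    = dA.items.foldl
      (fun res kv => res + (-(pvA_pen (kv.2.foldl pvA_scan (0, 0, 0))))) (n * 2) := by
    apply PySem.List.foldl_congr_mem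
    intro res kv _
    dsimp only
    unfold pvA_pen
    split_ifs <;> ring
  rw [hbody, PySem.List.foldl_add]
  rw [PySem.Dict.items_eq_map_keys dA ndA [], List.map_map]
  congr 1
  rw [hkeys]
  have hfun : ∀ k ∈ PySem.Set.ofList (rs.map (·.1)),
      ((fun kv : Int × List Int => -(pvA_pen (List.foldl pvA_scan (0, 0, 0) kv.2))) ∘
        (fun k => (k, dA.getD k []))) k
      = (fun k => -(pvA_pen (((rs.filter (fun p => p.1 == k)).map (·.2)).foldl pvA_scan (0, 0, 0)))) k := by
    intro k _
    have hA : dA.getD k [] = (rs.filter (fun p => p.1 == k)).map (·.2) := by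
      rw [hdA, PySem.Dict.getD_foldl_modify_append]
      simp
    simp only [Function.comp, hA]
  rw [List.map_congr_left hfun]

theorem pv_main (n : Int) (rs : List (Int × Int)) :
    maxNumberOfFamilies2 n rs = maxNumberOfFamilies2_alt n rs := by
  rw [pv_A_eq_sum]
  unfold maxNumberOfFamilies2_alt
  have hperm : (PySem.List.sorted rs (fun p => p.1) false).Perm rs :=
    PySem.List.sorted_perm rs (fun p => p.1) false
  have hp : (PySem.List.sorted rs (fun p => p.1) false).Pairwise (fun a b => a.1 ≤ b.1) :=
    PySem.List.sorted_pairwise rs (fun p => p.1)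
  have hnd : (PySem.Set.ofList (rs.map (·.1))).Nodup := PySem.Set.nodup_ofList _
  have hmem : ∀ k, k ∈ PySem.Set.ofList (rs.map (·.1)) ↔
      k ∈ (PySem.List.sorted rs (fun p => p.1) false).map (·.1) := by
    intro k
    rw [PySem.Set.mem_ofList, (hperm.map (·.1)).mem_iff]
  rw [pv_go_eq _ hp _ hnd hmem]
  have hpt : ∀ k ∈ PySem.Set.ofList (rs.map (·.1)),
      pvB_fit (((PySem.List.sorted rs (fun p => p.1) false).filter (fun p => p.1 == k)).map (·.2)) - 2
        = -(pvA_pen (((rs.filter (fun p => p.1 == k)).map (·.2)).foldl pvA_scan (0, 0, 0))) := by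
    intro k _
    have hcp : (((PySem.List.sorted rs (fun p => p.1) false).filter (fun p => p.1 == k)).map (·.2)).Perm
        ((rs.filter (fun p => p.1 == k)).map (·.2)) := (hperm.filter _).map _
    rw [pv_fit_perm hcp, pv_fit_eq_pen]
  rw [List.map_congr_left hpt]
  ring

-- ===== VERDICT (by name: the statement is the Claim_ definition above) =====
theorem maxNumberOfFamilies2_spec : Claim_equal_maxNumberOfFamilies2 := by
  intro n rs _
  exact pv_main n rs
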